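-- pv_equiv track=rewrite | github.com/simsanutiy/BrainiNESs | nesfuck.py | bf_parse
-- ===== SOURCE A (Python) =====
-- def bf_parse(inp):
--     """Убираем лишние символы и комментарии"""
--     code = ''
--     comm_flag = 0
--     for sym in inp:
--         if sym == '#': comm_flag = 1
--         if sym == '\n': comm_flag = 0
--         if comm_flag == 0:
--             if sym in '><+-.,[]':
--                 code += sym
--     code += '}'
--     return code
-- ===== SOURCE B (Python) =====
-- def bf_parse(inp):
--     """Line-based rewrite: split on newlines, cut each line at '#', keep valid chars."""
--     out = []
--     for line in inp.split('\n'):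
--         for ch in line:
--             if ch == '#':
--                 break
--             if ch in '><+-.,[]':
--                 out.append(ch)
--     return ''.join(out) + '}'
-- ===== Notes on version B (the rewrite author's own statement) =====
-- stated objective: simpler
-- what changed: Replaces A's single stateful scan with a comment flag by splitting the input into lines, cutting each line at its first comment marker, and filtering the remaining characters against the valid Brainfuck set.
import Mathlib
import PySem

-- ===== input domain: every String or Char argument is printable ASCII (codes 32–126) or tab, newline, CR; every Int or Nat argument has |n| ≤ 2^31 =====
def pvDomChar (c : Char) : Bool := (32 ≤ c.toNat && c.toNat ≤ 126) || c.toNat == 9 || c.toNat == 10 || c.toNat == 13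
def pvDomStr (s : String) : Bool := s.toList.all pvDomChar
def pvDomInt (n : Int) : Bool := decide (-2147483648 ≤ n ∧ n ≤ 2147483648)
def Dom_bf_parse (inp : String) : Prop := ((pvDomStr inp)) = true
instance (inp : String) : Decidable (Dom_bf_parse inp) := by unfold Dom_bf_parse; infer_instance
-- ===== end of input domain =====

-- B replaces A's stateful comment-flag scan by a split-into-lines / cut-at-'#' / filter pass (objective: simpler).

-- `sym in '><+-.,[]'` for a single character = membership in that character set (shared by both ports)
def bfValidChar (c : Char) : Bool := ['>', '<', '+', '-', '.', ',', '[', ']'].contains c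

-- ===== PORT A =====
def bf_parse (inp : String) : String :=
  let st := inp.toList.foldl
    (fun (st : List Char × Int) sym =>
      let flag1 : Int := if sym = '#' then 1 else st.2
      let flag2 : Int := if sym = '\n' then 0 else flag1
      let code : List Char :=
        if flag2 = 0 then (if bfValidChar sym then st.1 ++ [sym] else st.1) else st.1
      (code, flag2))
    ([], 0)
  String.mk (st.1 ++ ['}'])

-- ===== PORT B =====
-- inner `for ch in line: if ch == '#': break; if ch in '><+-.,[]': out.append(ch)`:
-- the characters this loop appends for one line
def bfLine : List Char → List Char
  | [] => []
  | ch :: rest =>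
    if ch = '#' then []
    else if bfValidChar ch then ch :: bfLine rest
    else bfLine rest

def bf_parse_alt (inp : String) : String :=
  let out := (PySem.Chars.splitOn inp.toList ['\n']).foldl (fun out line => out ++ bfLine line) []
  String.mk (out ++ ['}'])

-- ===== PRECONDITION & SPEC =====
def Spec_bf_parse (inp : String) (out : String) : Prop := out = bf_parse_alt inp
instance (inp : String) (out : String) : Decidable (Spec_bf_parse inp out) := by unfold Spec_bf_parse; infer_instance

-- ===== CLAIM (what is proved, stated in full; the proofs are below) =====
def Claim_equal_bf_parse : Prop := ∀ (inp : String), Dom_bf_parse inp → Spec_bf_parse inp (bf_parse inp)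

-- ===== LEMMAS AND PROOFS =====

-- the step function of A's loop (definitionally equal to the lambda in bf_parse)
def stepA (st : List Char × Int) (sym : Char) : List Char × Int :=
  let flag1 : Int := if sym = '#' then 1 else st.2
  let flag2 : Int := if sym = '\n' then 0 else flag1
  let code : List Char :=
    if flag2 = 0 then (if bfValidChar sym then st.1 ++ [sym] else st.1) else st.1
  (code, flag2)

-- structural characterisation of Python's str.split('\n')
def splitNl : List Char → List (List Char)
  | [] => [[]]
  | c :: r => if c = '\n' then [] :: splitNl r else (splitNl r).modifyHead (c :: ·)

theorem splitNl_ne_nil (l : List Char) : splitNl l ≠ [] := by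
  cases l with
  | nil => simp [splitNl]
  | cons c r =>
    simp only [splitNl]
    split
    · simp
    · cases h : splitNl r with
      | nil => exact absurd h (splitNl_ne_nil r)
      | cons a t => simp [List.modifyHead]

theorem splitNl_cons_ex (r : List Char) : ∃ a t, splitNl r = a :: t := by
  cases h : splitNl r with
  | nil => exact absurd h (splitNl_ne_nil r)
  | cons a t => exact ⟨a, t, rfl⟩

theorem splitOn_go_eq (fuel : Nat) (l cur : List Char) (acc : List (List Char))
    (h : l.length < fuel) :
    PySem.Chars.splitOn.go ['\n'] fuel l cur acc
      = acc.reverse ++ (splitNl l).modifyHead (cur.reverse ++ ·) := by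
  induction fuel generalizing l cur acc with
  | zero => omega
  | succ m ih =>
    cases l with
    | nil => simp [PySem.Chars.splitOn.go, splitNl, List.modifyHead]
    | cons c r =>
      by_cases hc : c = '\n'
      · subst hc
        have hpre : (['\n'] : List Char).isPrefixOf ('\n' :: r) = true := by
          simp [List.isPrefixOf]
        rw [PySem.Chars.splitOn.go]
        simp only [hpre, if_pos, List.length_cons, List.length_nil, Nat.zero_add,
          List.drop_succ_cons, List.drop_zero]
        rw [ih r [] (cur.reverse :: acc) (by simpa using Nat.lt_of_succ_lt_succ h)]
        obtain ⟨a, t, hs⟩ := splitNl_cons_ex r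
        simp [splitNl, hs, List.modifyHead]
      · have hpre : (['\n'] : List Char).isPrefixOf (c :: r) = false := by
          simp only [List.isPrefixOf, Bool.and_eq_false_iff, beq_eq_false_iff_ne, ne_eq]
          exact Or.inl fun h => hc h.symm
        rw [PySem.Chars.splitOn.go]
        simp only [hpre, Bool.false_eq_true, if_false]
        rw [ih r (c :: cur) acc (by simpa using Nat.lt_of_succ_lt_succ h)]
        obtain ⟨a, t, hs⟩ := splitNl_cons_ex r
        simp [splitNl, hs, hc, List.modifyHead]

theorem splitOn_eq (l : List Char) : PySem.Chars.splitOn l ['\n'] = splitNl l := by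
  rw [PySem.Chars.splitOn, splitOn_go_eq (l.length + 1) l [] [] (by omega)]
  obtain ⟨a, t, hs⟩ := splitNl_cons_ex l
  simp [hs, List.modifyHead]

def B0 (l : List Char) : List Char := ((splitNl l).map bfLine).flatten
def B1 (l : List Char) : List Char := ((splitNl l).tail.map bfLine).flatten

theorem foldA_spec (l : List Char) : ∀ acc : List Char,
    (l.foldl stepA (acc, 0)).1 = acc ++ B0 l
    ∧ (l.foldl stepA (acc, 1)).1 = acc ++ B1 l := by
  induction l with
  | nil => intro acc; simp [B0, B1, splitNl, bfLine]
  | cons c r ih =>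
    intro acc
    obtain ⟨a, t, hs⟩ := splitNl_cons_ex r
    constructor
    · by_cases hnl : c = '\n'
      · subst hnl
        have h1 : stepA (acc, 0) '\n' = (acc, 0) := by simp [stepA]; decide
        rw [List.foldl_cons, h1, (ih acc).1]
        simp [B0, splitNl, bfLine]
      · by_cases hsh : c = '#'
        · subst hsh
          have h1 : stepA (acc, 0) '#' = (acc, 1) := by simp [stepA]
          rw [List.foldl_cons, h1, (ih acc).2]
          simp [B0, B1, splitNl, hs, List.modifyHead, bfLine]
        · by_cases hv : bfValidChar c = true
          · have h1 : stepA (acc, 0) c = (acc ++ [c], 0) := by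
              simp [stepA, hnl, hsh, hv]
            rw [List.foldl_cons, h1, (ih (acc ++ [c])).1]
            simp [B0, splitNl, hnl, hs, List.modifyHead, bfLine, hsh, hv]
          · have h1 : stepA (acc, 0) c = (acc, 0) := by
              simp [stepA, hnl, hsh, hv]
            rw [List.foldl_cons, h1, (ih acc).1]
            simp [B0, splitNl, hnl, hs, List.modifyHead, bfLine, hsh, hv]
    · by_cases hnl : c = '\n'
      · subst hnl
        have h1 : stepA (acc, 1) '\n' = (acc, 0) := by simp [stepA]; decide
        rw [List.foldl_cons, h1, (ih acc).1]
        simp [B0, B1, splitNl]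
      · have h1 : stepA (acc, 1) c = (acc, 1) := by
          simp only [stepA, if_neg hnl]
          split <;> norm_num
        rw [List.foldl_cons, h1, (ih acc).2]
        simp [B1, splitNl, hnl, hs, List.modifyHead]

theorem foldB_spec (ls : List (List Char)) : ∀ acc : List Char,
    ls.foldl (fun out line => out ++ bfLine line) acc = acc ++ (ls.map bfLine).flatten := by
  induction ls with
  | nil => intro acc; simp
  | cons a t ih => intro acc; simp [ih]

-- ===== VERDICT (by name: the statement is the Claim_ definition above) =====
theorem bf_parse_spec : Claim_equal_bf_parse := by
  intro inp _
  show String.mk ((inp.toList.foldl stepA ([], 0)).1 ++ ['}'])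
      = String.mk ((PySem.Chars.splitOn inp.toList ['\n']).foldl
          (fun out line => out ++ bfLine line) [] ++ ['}'])
  rw [splitOn_eq, foldB_spec, (foldA_spec inp.toList []).1]
  simp [B0]
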